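-- pv_equiv track=rewrite | github.com/nelson-gif940/PythonFiles | _Stocks_recessions.py | intersection_of_dicts_all_values
-- ===== SOURCE A (Python) =====
-- def intersection_of_dicts_all_values(dicts):
--
--   if not dicts:
--     return {}
--
--   key_sets = [set(d.keys()) for d in dicts]
--
--   common_keys = set.intersection(*key_sets)
--
--   intersection_dict = {}
--   for key in common_keys:
--     values = []
--     for d in dicts:
--       if key in d:
--         values.append(d[key])
--     intersection_dict[key] = values
--
--   return intersection_dict
-- ===== SOURCE B (Python) =====
-- def intersection_of_dicts_all_values(dicts):
--   if not dicts:
--     return {}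
--   groups = {}
--   for d in dicts:
--     for key, value in d.items():
--       groups.setdefault(key, []).append(value)
--   n = len(dicts)
--   return {key: vals for key, vals in groups.items() if len(vals) == n}
-- ===== Notes on version B (the rewrite author's own statement) =====
-- stated objective: alternative
-- what changed: B performs no membership tests and no set intersection at all: one grouping pass over all dicts accumulates key -> list of its values via setdefault, and a key is common exactly when its group holds len(dicts) values, since dict keys are unique per dict.
import Mathlib
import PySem

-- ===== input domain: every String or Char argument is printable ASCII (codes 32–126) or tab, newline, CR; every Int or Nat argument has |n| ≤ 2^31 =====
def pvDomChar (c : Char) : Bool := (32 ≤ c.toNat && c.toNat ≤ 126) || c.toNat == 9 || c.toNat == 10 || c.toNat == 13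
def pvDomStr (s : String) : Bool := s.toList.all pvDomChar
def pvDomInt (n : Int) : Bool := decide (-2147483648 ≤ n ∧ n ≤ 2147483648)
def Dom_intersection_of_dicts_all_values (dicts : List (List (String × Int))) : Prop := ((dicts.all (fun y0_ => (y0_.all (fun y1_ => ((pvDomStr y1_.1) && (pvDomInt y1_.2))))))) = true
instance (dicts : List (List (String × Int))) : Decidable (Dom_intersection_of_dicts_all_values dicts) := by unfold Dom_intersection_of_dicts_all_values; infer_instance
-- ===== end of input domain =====

-- B replaces A's key-set intersection and per-key membership tests by one grouping pass
-- (key -> list of its values across all dicts); a key is common iff its group has len(dicts)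
-- values (objective: alternative).


-- ===== PORT A =====
-- Python A iterates over `common_keys`, a set, so the order in which the result dict's keys
-- are produced is Python's hash order; dict outputs are compared ignoring order, and the port
-- emits the common keys in first-dict insertion order.
def intersection_of_dicts_all_values (dicts : List (List (String × Int))) : List (String × List Int) :=
  if dicts = [] then []
  else
    let key_sets := dicts.map (fun d => PySem.Set.ofList (PySem.Dict.mk d).keys)
    let common_keys : PySem.Set String :=
      match key_sets with
      | [] => []
      | s :: restSets => restSets.foldl PySem.Set.inter s
    (common_keys.foldl
      (fun (acc : PySem.Dict String (List Int)) key =>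
        acc.insert key
          (dicts.foldl
            (fun vs d =>
              if (PySem.Dict.mk d).contains key then vs ++ [((PySem.Dict.mk d).get? key).getD 0]
              else vs) []))
      PySem.Dict.empty).items

-- ===== PORT B =====
def intersection_of_dicts_all_values_alt (dicts : List (List (String × Int))) : List (String × List Int) :=
  match dicts with
  | [] => []
  | _ :: _ =>
    let groups : PySem.Dict String (List Int) :=
      dicts.foldl
        (fun g d => (PySem.Dict.mk d).items.foldl
          (fun g kv => g.modify kv.1 [] (fun vs => vs ++ [kv.2])) g)
        PySem.Dict.empty
    let n := dicts.length
    ((groups.items.filter (fun kv => kv.2.length == n)).foldl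
      (fun (r : PySem.Dict String (List Int)) kv => r.insert kv.1 kv.2)
      PySem.Dict.empty).items

-- ===== PRECONDITION & SPEC =====
-- Pre_ only rules out association lists with a duplicated key inside one dict: a Python dict
-- argument can never carry a duplicate key, so such lists represent no input A is ever called on.
def Pre_intersection_of_dicts_all_values (dicts : List (List (String × Int))) : Prop :=
  ∀ d ∈ dicts, (d.map Prod.fst).Nodup
instance (dicts : List (List (String × Int))) : Decidable (Pre_intersection_of_dicts_all_values dicts) := by
  unfold Pre_intersection_of_dicts_all_values; infer_instance
def pvWitness_intersection_of_dicts_all_values : (List (List (String × Int))) :=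
  [[("a", 1), ("b", 2)], [("b", 3), ("c", 4)]]
def Spec_intersection_of_dicts_all_values (dicts : List (List (String × Int))) (out : List (String × List Int)) : Prop := out = intersection_of_dicts_all_values_alt dicts
instance (dicts : List (List (String × Int))) (out : List (String × List Int)) : Decidable (Spec_intersection_of_dicts_all_values dicts out) := by unfold Spec_intersection_of_dicts_all_values; infer_instance

-- ===== CLAIM (what is proved, stated in full; the proofs are below) =====
def Claim_equal_intersection_of_dicts_all_values : Prop := ∀ (dicts : List (List (String × Int))), Dom_intersection_of_dicts_all_values dicts → Pre_intersection_of_dicts_all_values dicts → Spec_intersection_of_dicts_all_values dicts (intersection_of_dicts_all_values dicts)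

-- ===== LEMMAS AND PROOFS =====

theorem pv_witness_ok :
    Dom_intersection_of_dicts_all_values pvWitness_intersection_of_dicts_all_values ∧
    Pre_intersection_of_dicts_all_values pvWitness_intersection_of_dicts_all_values := by
  constructor <;> decide

-- folding set-intersection over a list of sets is one filter by membership in all of them
theorem pv_foldl_inter {α : Type} [BEq α] (sets : List (PySem.Set α)) (s : PySem.Set α) :
    sets.foldl PySem.Set.inter s = s.filter (fun x => sets.all (fun t => t.contains x)) := by
  induction sets generalizing s with
  | nil => simp
  | cons t ts ih =>
      simp only [List.foldl_cons, ih, PySem.Set.inter, List.filter_filter, List.all_cons]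
      congr 1
      funext x
      rw [Bool.and_comm]

-- in a dict with distinct keys, filtering the pairs by key k yields exactly the (k, d[k]) pair
-- when k is present, and nothing otherwise
theorem pv_filter_key (k : String) :
    ∀ (d : List (String × Int)), (d.map Prod.fst).Nodup →
      d.filter (fun p => p.1 == k) =
        if (PySem.Dict.mk d).contains k
        then [(k, ((PySem.Dict.mk d).get? k).getD 0)] else []
  | [], _ => by simp [PySem.Dict.contains]
  | (k1, v1) :: t, hnd => by
    simp only [List.map_cons, List.nodup_cons] at hnd
    obtain ⟨ha, ht⟩ := hnd
    by_cases hk : k1 = k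
    · subst hk
      have hnil : t.filter (fun p => p.1 == k1) = [] := by
        rw [List.filter_eq_nil_iff]
        intro p hp
        simp only [beq_iff_eq]
        intro hpk
        exact ha (hpk ▸ List.mem_map_of_mem hp)
      have hc : (PySem.Dict.mk ((k1, v1) :: t)).contains k1 = true := by
        simp [PySem.Dict.contains]
      rw [List.filter_cons_of_pos (by simp), hnil, if_pos hc, PySem.Dict.get?_mk_cons]
      simp
    · have hcont : (PySem.Dict.mk ((k1, v1) :: t)).contains k = (PySem.Dict.mk t).contains k := by
        simp [PySem.Dict.contains, hk]
      have hg : (PySem.Dict.mk ((k1, v1) :: t)).get? k = (PySem.Dict.mk t).get? k := by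
        rw [PySem.Dict.get?_mk_cons]; simp [hk]
      rw [List.filter_cons_of_neg (by simp [hk]), hcont, hg]
      exact pv_filter_key k t ht

-- across dicts with distinct keys, the pairs with key k number exactly the dicts containing k
theorem pv_len (k : String) :
    ∀ (ds : List (List (String × Int))), (∀ d ∈ ds, (d.map Prod.fst).Nodup) →
      (ds.flatten.filter (fun p => p.1 == k)).length =
        ds.countP (fun d => (PySem.Dict.mk d).contains k)
  | [], _ => by simp
  | d :: t, hnd => by
    rw [List.flatten_cons, List.filter_append, List.length_append,
      pv_filter_key k d (hnd d (List.mem_cons_self ..)),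
      pv_len k t (fun d' hd' => hnd d' (List.mem_cons_of_mem _ hd')), List.countP_cons]
    split_ifs with h
    · simp
      omega
    · simp

-- when every dict contains k, the values of the key-k pairs are the per-dict lookups in order
theorem pv_vals (k : String) :
    ∀ (ds : List (List (String × Int))), (∀ d ∈ ds, (d.map Prod.fst).Nodup) →
      (∀ d ∈ ds, (PySem.Dict.mk d).contains k = true) →
      (ds.flatten.filter (fun p => p.1 == k)).map (fun p => p.2) =
        ds.map (fun d => ((PySem.Dict.mk d).get? k).getD 0)
  | [], _, _ => by simp
  | d :: t, hnd, hall => by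
    rw [List.flatten_cons, List.filter_append, List.map_append,
      pv_filter_key k d (hnd d (List.mem_cons_self ..)),
      if_pos (hall d (List.mem_cons_self ..)),
      pv_vals k t (fun d' hd' => hnd d' (List.mem_cons_of_mem _ hd'))
        (fun d' hd' => hall d' (List.mem_cons_of_mem _ hd'))]
    simp

-- A's port, in closed form: the first dict's keys that every dict contains, each mapped to
-- the list of per-dict lookups
theorem pv_A_eq (first : List (String × Int)) (rest : List (List (String × Int)))
    (hPre : ∀ d ∈ first :: rest, (d.map Prod.fst).Nodup) :
    intersection_of_dicts_all_values (first :: rest) =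
      ((first.map (fun p => p.1)).filter
          (fun k => (first :: rest).all (fun d => (PySem.Dict.mk d).contains k))).map
        (fun k => (k, (first :: rest).map (fun d => ((PySem.Dict.mk d).get? k).getD 0))) := by
  unfold intersection_of_dicts_all_values
  simp only [if_neg (List.cons_ne_nil first rest), List.map_cons]
  have hnd : ((PySem.Dict.mk first).keys).Nodup := by
    simpa [PySem.Dict.keys] using hPre first (List.mem_cons_self ..)
  rw [pv_foldl_inter, PySem.Set.ofList_eq_self_of_nodup _ hnd]
  have hSD : ∀ (d : List (String × Int)) (key : String),
      (PySem.Set.ofList (PySem.Dict.mk d).keys).contains key = (PySem.Dict.mk d).contains key := by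
    intro d key
    rw [Bool.eq_iff_iff]
    simp [PySem.Set.mem_ofList, PySem.Dict.contains, PySem.Dict.keys,
      List.any_eq_true, List.mem_map]
  have hPQ : ∀ key : String,
      ((rest.map (fun d => PySem.Set.ofList (PySem.Dict.mk d).keys)).all
        (fun t => t.contains key))
      = rest.all (fun d => (PySem.Dict.mk d).contains key) := by
    intro key
    rw [List.all_map]
    exact congrArg rest.all (funext (fun d => hSD d key))
  simp only [hPQ]
  have hkeys : (PySem.Dict.mk first).keys = first.map (fun p => p.1) := rfl
  have hfilter : ((PySem.Dict.mk first).keys).filter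
        (fun key => rest.all (fun d => (PySem.Dict.mk d).contains key))
      = (first.map (fun p => p.1)).filter
        (fun k => (first :: rest).all (fun d => (PySem.Dict.mk d).contains k)) := by
    rw [hkeys]
    apply List.filter_congr
    intro k hk
    have hfirst : (PySem.Dict.mk first).contains k = true := by
      simp only [List.mem_map] at hk
      obtain ⟨p, hp, hpk⟩ := hk
      simp only [PySem.Dict.contains, List.any_eq_true]
      exact ⟨p, hp, by simp [hpk]⟩
    rw [List.all_cons, hfirst, Bool.true_and]
  rw [hfilter]
  rw [PySem.Dict.items_foldl_insert_fresh _ (fun key => key)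
      (fun key => (first :: rest).foldl
        (fun vs d => if (PySem.Dict.mk d).contains key
          then vs ++ [((PySem.Dict.mk d).get? key).getD 0] else vs) [])
      PySem.Dict.empty (by simp)
      (by simpa [List.map_id'] using
        (List.Nodup.filter _ (by simpa [PySem.Dict.keys] using hnd)))]
  simp only [PySem.Dict.empty, List.nil_append]
  apply List.map_congr_left
  intro k hk
  have hq := List.of_mem_filter hk
  have hall : ∀ d ∈ first :: rest, (PySem.Dict.mk d).contains k = true := List.all_eq_true.mp hq
  rw [PySem.List.foldl_append_if (fun d => (PySem.Dict.mk d).contains k)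
    (fun d => ((PySem.Dict.mk d).get? k).getD 0) (first :: rest) []]
  rw [List.filter_eq_self.mpr hall]
  simp

-- a fold inserting distinct fresh keys into an empty dict reproduces its input list
theorem pv_items_fold (l : List (String × List Int))
    (hn : (l.map (fun kv => kv.1)).Nodup) :
    (l.foldl (fun (r : PySem.Dict String (List Int)) kv => r.insert kv.1 kv.2)
      PySem.Dict.empty).items = l := by
  have h2 := PySem.Dict.items_foldl_insert_fresh l (fun kv => kv.1) (fun kv => kv.2)
    PySem.Dict.empty (by simp) hn
  simpa using h2

-- B's port, in the same closed form
theorem pv_B_eq (first : List (String × Int)) (rest : List (List (String × Int)))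
    (hPre : ∀ d ∈ first :: rest, (d.map Prod.fst).Nodup) :
    intersection_of_dicts_all_values_alt (first :: rest) =
      ((first.map (fun p => p.1)).filter
          (fun k => (first :: rest).all (fun d => (PySem.Dict.mk d).contains k))).map
        (fun k => (k, (first :: rest).map (fun d => ((PySem.Dict.mk d).get? k).getD 0))) := by
  have hdef : intersection_of_dicts_all_values_alt (first :: rest) =
      (((((first :: rest).foldl
            (fun g d => d.foldl
              (fun (g : PySem.Dict String (List Int)) kv =>
                g.modify kv.1 [] (fun vs => vs ++ [kv.2])) g)
            PySem.Dict.empty)).items.filter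
          (fun kv => kv.2.length == (first :: rest).length)).foldl
        (fun (r : PySem.Dict String (List Int)) kv => r.insert kv.1 kv.2)
        PySem.Dict.empty).items := rfl
  rw [hdef, ← List.foldl_flatten]
  set P := (first :: rest).flatten with hP
  set groups : PySem.Dict String (List Int) :=
    P.foldl (fun g kv => g.modify kv.1 [] (fun vs => vs ++ [kv.2])) PySem.Dict.empty with hgroups
  have hG : ∀ k, groups.getD k [] = (P.filter (fun p => p.1 == k)).map (fun p => p.2) := by
    intro k
    rw [hgroups, PySem.Dict.getD_foldl_modify_append]
    simp
  have hK : groups.keys = PySem.Set.ofList (P.map (fun kv => kv.1)) := by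
    rw [hgroups, PySem.Dict.keys_foldl_modify_key P (fun kv => kv.1) []
      (fun _ kv => (fun vs => vs ++ [kv.2])) PySem.Dict.empty]
    rw [show (PySem.Dict.empty : PySem.Dict String (List Int)).keys = [] from rfl,
      PySem.Set.update_nil_left]
  have hNd : groups.keys.Nodup := by
    exact PySem.Dict.nodup_keys_foldl_modify_key P (fun kv => kv.1) []
      (fun _ kv => (fun vs => vs ++ [kv.2])) PySem.Dict.empty (by simp)
  rw [PySem.Dict.items_eq_map_keys groups hNd []]
  rw [List.filter_map]
  have hcomp : ((fun kv : String × List Int => kv.2.length == (first :: rest).length) ∘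
      (fun k => (k, groups.getD k []))) =
      fun k => (groups.getD k []).length == (first :: rest).length := rfl
  rw [hcomp]
  rw [pv_items_fold _ (by simpa [Function.comp_def] using List.Nodup.filter _ hNd)]
  -- rewrite the predicate pointwise into "every dict contains k"
  have hpred : ∀ k, ((groups.getD k []).length == (first :: rest).length)
      = (first :: rest).all (fun d => (PySem.Dict.mk d).contains k) := by
    intro k
    rw [hG, List.length_map, hP, pv_len k (first :: rest) hPre, Bool.eq_iff_iff, beq_iff_eq,
      List.countP_eq_length]
    exact (List.all_eq_true).symm
  simp only [hpred]
  -- split the deduplicated key list: keys beyond the first dict are never common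
  have hfirstnd : (first.map (fun p => p.1)).Nodup := by
    have := hPre first (List.mem_cons_self ..)
    simpa using this
  have hKsplit : groups.keys = first.map (fun p => p.1) ++
      (PySem.Set.ofList ((rest.flatten).map (fun kv => kv.1))).filter
        (fun y => !(PySem.Set.contains (PySem.Set.ofList (first.map (fun p => p.1))) y)) := by
    rw [hK, hP, List.flatten_cons, List.map_append, PySem.Set.ofList_append,
      PySem.Set.update_eq_append_filter, PySem.Set.ofList_eq_self_of_nodup _ hfirstnd]
  rw [hKsplit, List.filter_append]
  have htail : ((PySem.Set.ofList ((rest.flatten).map (fun kv => kv.1))).filter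
        (fun y => !(PySem.Set.contains (PySem.Set.ofList (first.map (fun p => p.1))) y))).filter
        (fun k => (first :: rest).all (fun d => (PySem.Dict.mk d).contains k)) = [] := by
    rw [List.filter_eq_nil_iff]
    intro k hk hkall
    have hnotin := List.of_mem_filter hk
    have hall : ∀ d ∈ first :: rest, (PySem.Dict.mk d).contains k = true :=
      List.all_eq_true.mp hkall
    have hfirst : (PySem.Dict.mk first).contains k = true :=
      hall first (List.mem_cons_self ..)
    have hmem : k ∈ first.map (fun p => p.1) := by
      simp only [PySem.Dict.contains, List.any_eq_true] at hfirst
      obtain ⟨p, hp, hpk⟩ := hfirst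
      exact List.mem_map.mpr ⟨p, hp, by simpa using hpk⟩
    simp at hnotin
    obtain ⟨⟨a, b⟩, hp, hpk⟩ := List.mem_map.mp hmem
    subst hpk
    exact hnotin b hp
  rw [htail, List.append_nil]
  apply List.map_congr_left
  intro k hk
  have hq := List.of_mem_filter hk
  have hall : ∀ d ∈ first :: rest, (PySem.Dict.mk d).contains k = true :=
    List.all_eq_true.mp hq
  rw [hG, hP, pv_vals k (first :: rest) hPre hall]

-- ===== VERDICT (by name: the statement is the Claim_ definition above) =====
theorem intersection_of_dicts_all_values_spec : Claim_equal_intersection_of_dicts_all_values := by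
  intro dicts _hDom hPre
  unfold Spec_intersection_of_dicts_all_values
  match dicts with
  | [] => rfl
  | first :: rest => rw [pv_A_eq first rest hPre, pv_B_eq first rest hPre]
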